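-- pv_equiv track=rewrite | github.com/AndreasRaaskov/Bot-Detector | backend/analyzers.py | _find_longest_inactive_period
-- ===== SOURCE A (Python) =====
-- from typing import List, Dict, Set, Tuple, Optional
-- from collections import Counter, defaultdict
--
-- def _find_longest_inactive_period(posting_hours: List[int]) -> int:
--     """Find the longest consecutive period with no posts (in hours)"""
--     if not posting_hours:
--         return 24  # If no posts, assume 24-hour inactive period
--
--     # Count posts in each hour of the day
--     hour_counts = Counter(posting_hours)
--
--     # Find longest consecutive period of hours with zero posts
--     max_inactive = 0
--     current_inactive = 0
--
--     # Check each hour of the day (0-23, then wrap around)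
--     for hour in list(range(24)) * 2:  # Double to handle wrap-around
--         if hour_counts.get(hour % 24, 0) == 0:
--             current_inactive += 1
--             max_inactive = max(max_inactive, current_inactive)
--         else:
--             current_inactive = 0
--
--     return min(max_inactive, 24)  # Cap at 24 hours
-- ===== SOURCE B (Python) =====
-- def _find_longest_inactive_period(posting_hours):
--     """Longest consecutive run of hours (cyclic over the day) with no posts."""
--     active = sorted({h for h in posting_hours if 0 <= h < 24})
--     if not active:
--         return 24
--     best = active[0] + 24 - active[-1] - 1  # wrap-around gap
--     for prev, nxt in zip(active, active[1:]):
--         best = max(best, nxt - prev - 1)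
--     return best
-- ===== Notes on version B (the rewrite author's own statement) =====
-- stated objective: simpler
-- what changed: A counts posts per hour into a Counter and scans a doubled 48-step hour sequence with a running run-length accumulator; B sorts the distinct active hours in [0,24) and returns the maximum of the gaps between consecutive active hours plus the wrap-around gap (24 if there is no valid active hour).
import Mathlib
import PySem

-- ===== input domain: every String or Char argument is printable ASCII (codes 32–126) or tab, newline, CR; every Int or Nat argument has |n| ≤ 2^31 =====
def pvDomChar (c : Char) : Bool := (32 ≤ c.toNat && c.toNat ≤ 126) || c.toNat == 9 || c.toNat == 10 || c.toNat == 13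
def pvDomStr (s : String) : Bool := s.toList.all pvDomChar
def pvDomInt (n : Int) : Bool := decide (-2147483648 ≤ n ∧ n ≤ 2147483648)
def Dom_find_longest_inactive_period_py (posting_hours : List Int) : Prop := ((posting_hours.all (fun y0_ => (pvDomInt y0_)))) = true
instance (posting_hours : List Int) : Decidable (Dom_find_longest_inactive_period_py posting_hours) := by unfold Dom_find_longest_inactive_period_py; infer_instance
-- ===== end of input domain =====

-- B replaces A's 48-step doubled-day scan with a sort of the distinct active hours and a
-- max over the gaps between consecutive active hours (plus the wrap-around gap): simpler,
-- and it only walks the (at most 24) distinct active hours instead of always 48 scan steps.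

-- ===== PORT A =====
def find_longest_inactive_period_py (posting_hours : List Int) : Int :=
  if posting_hours = [] then 24
  else
    -- hour_counts = Counter(posting_hours)
    let hour_counts := PySem.Dict.counter posting_hours
    -- for hour in list(range(24)) * 2: running (max_inactive, current_inactive)
    let st := (PySem.List.pyRange 0 24 1 ++ PySem.List.pyRange 0 24 1).foldl
      (fun (s : Int × Int) hour =>
        if hour_counts.getD (PySem.Int.mod hour 24) 0 == 0 then (max s.1 (s.2 + 1), s.2 + 1)
        else (s.1, 0)) (0, 0)
    min st.1 24

-- ===== PORT B =====
-- helper: active[-1] of the known-nonempty list a :: r (Python's negative index on a nonempty list)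
def pyLastB (a : Int) (r : List Int) : Int :=
  match r with
  | [] => a
  | b :: t => pyLastB b t

def find_longest_inactive_period_py_alt (posting_hours : List Int) : Int :=
  -- active = sorted({h for h in posting_hours if 0 <= h < 24})
  let active := PySem.List.sorted
    (PySem.Set.ofList (posting_hours.filter (fun h => decide (0 ≤ h) && decide (h < 24))))
    (fun x => x) false
  match active with
  | [] => 24
  | a :: r =>
    -- best = active[0] + 24 - active[-1] - 1; for prev, nxt in zip(active, active[1:]): best = max(best, nxt - prev - 1)
    (List.zip (a :: r) ((a :: r).drop 1)).foldl
      (fun best p => max best (p.2 - p.1 - 1)) (a + 24 - pyLastB a r - 1)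

-- ===== PRECONDITION & SPEC =====
def Spec_find_longest_inactive_period_py (posting_hours : List Int) (out : Int) : Prop := out = find_longest_inactive_period_py_alt posting_hours
instance (posting_hours : List Int) (out : Int) : Decidable (Spec_find_longest_inactive_period_py posting_hours out) := by unfold Spec_find_longest_inactive_period_py; infer_instance

-- ===== CLAIM (what is proved, stated in full; the proofs are below) =====
def Claim_equal_find_longest_inactive_period_py : Prop := ∀ (posting_hours : List Int), Dom_find_longest_inactive_period_py posting_hours → Spec_find_longest_inactive_period_py posting_hours (find_longest_inactive_period_py posting_hours)

-- ===== LEMMAS AND PROOFS =====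

-- The (max_inactive, current_inactive) scan of A, abstracted over the "hour is inactive" bits.
def pvScan2 (bs : List Bool) (mx cur : Int) : Int × Int :=
  match bs with
  | [] => (mx, cur)
  | b :: t => if b then pvScan2 t (max mx (cur + 1)) (cur + 1) else pvScan2 t mx 0

-- Symbolic result of scanning the inactivity bits of hours [p, 24) whose active hours are `as`.
def pvG (p : Int) (as : List Int) (mx cur : Int) : Int × Int :=
  match as with
  | [] => (max mx (cur + (24 - p)), cur + (24 - p))
  | a :: r => pvG (a + 1) r (max mx (cur + (a - p))) 0

-- max of the gaps a-p, a1-a0-1, …, and the trailing gap 24-last-1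
def pvGM (p : Int) (as : List Int) : Int :=
  match as with
  | [] => 24 - p
  | a :: r => max (a - p) (pvGM (a + 1) r)

-- B's adjacent-gap fold, recursively
def pvBFold (prev : Int) (r : List Int) (best : Int) : Int :=
  match r with
  | [] => best
  | b :: t => pvBFold b t (max best (b - prev - 1))

theorem pvScan2_replicate (g : Nat) : ∀ (K : List Bool) (mx cur : Int), 0 ≤ cur → cur ≤ mx →
    pvScan2 (List.replicate g true ++ K) mx cur = pvScan2 K (max mx (cur + g)) (cur + g) := by
  induction g with
  | zero =>
    intro K mx cur h0 h1
    simp only [List.replicate_zero, List.nil_append, Nat.cast_zero, add_zero, max_eq_left h1]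
  | succ n ih =>
    intro K mx cur h0 h1
    rw [List.replicate_succ, List.cons_append]
    show pvScan2 _ _ _ = _
    simp only [pvScan2]
    rw [ih K (max mx (cur + 1)) (cur + 1) (by omega) (by omega)]
    have e1 : max (max mx (cur + 1)) (cur + 1 + (n : Int)) = max mx (cur + ((n + 1 : Nat) : Int)) := by
      push_cast; omega
    have e2 : cur + 1 + (n : Int) = cur + ((n + 1 : Nat) : Int) := by push_cast; omega
    rw [e1, e2]
    simp

theorem pvFold_eq_scan2 (d : PySem.Dict Int Int) (hs : List Int) :
    ∀ (mx cur : Int),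
    hs.foldl (fun (s : Int × Int) hour =>
        if d.getD (PySem.Int.mod hour 24) 0 == 0 then (max s.1 (s.2 + 1), s.2 + 1)
        else (s.1, 0)) (mx, cur)
      = pvScan2 (hs.map (fun hour => d.getD (PySem.Int.mod hour 24) 0 == 0)) mx cur := by
  induction hs with
  | nil => intro mx cur; rfl
  | cons h t ih =>
    intro mx cur
    simp only [List.foldl_cons, List.map_cons, pvScan2]
    by_cases hb : (d.getD (PySem.Int.mod h 24) 0 == 0) = true
    · rw [if_pos hb, if_pos hb, ih]
    · rw [if_neg hb, if_neg hb, ih]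

-- the inactivity bit of hour h (0 ≤ h < 24) of A equals "h not a member of the posts"
theorem pvBit_eq (l : List Int) (h : Int) (h0 : 0 ≤ h) (h24 : h < 24) :
    ((PySem.Dict.counter l).getD (PySem.Int.mod h 24) 0 == 0) = !(l.contains h) := by
  rw [PySem.Int.mod_eq_emod_of_pos (by omega), Int.emod_eq_of_lt h0 h24]
  rw [PySem.Dict.getD_counter]
  by_cases hm : h ∈ l
  · have : 0 < l.count h := List.count_pos_iff.mpr hm
    simp [hm]
    omega
  · simp [List.count_eq_zero.mpr hm, hm]

-- the central lemma: scanning the inactivity bits of hours [p, 24) whose set of active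
-- hours is exactly the sorted list `as` continues like pvG
theorem pvScan_seg (l : List Int) : ∀ (as : List Int) (p : Int), 0 ≤ p → p ≤ 24 →
    List.Pairwise (· < ·) as →
    (∀ h : Int, h ∈ as ↔ (h ∈ l ∧ p ≤ h ∧ h < 24)) →
    ∀ (K : List Bool) (mx cur : Int), 0 ≤ cur → cur ≤ mx →
    pvScan2 ((PySem.List.pyRange p 24 1).map (fun h => !(l.contains h)) ++ K) mx cur
      = pvScan2 K (pvG p as mx cur).1 (pvG p as mx cur).2 := by
  intro as
  induction as with
  | nil =>
    intro p hp0 hp24 _ hmem K mx cur hc0 hcm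
    have hrep : (PySem.List.pyRange p 24 1).map (fun h => !(l.contains h))
        = List.replicate (24 - p).toNat true := by
      rw [List.eq_replicate_iff]
      constructor
      · simp [PySem.List.length_pyRange_one]
      · intro b hb
        obtain ⟨h, hh, rfl⟩ := List.mem_map.mp hb
        have := PySem.List.mem_pyRange_one.mp hh
        have hnot : h ∉ l := by
          intro hin
          exact (List.not_mem_nil (a := h)).elim (by simpa using (hmem h).mpr ⟨hin, this.1, this.2⟩)
        simp [hnot]
    rw [hrep, pvScan2_replicate _ K mx cur hc0 hcm]
    have : ((24 - p).toNat : Int) = 24 - p := by omega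
    rw [this]; rfl
  | cons a r ih =>
    intro p hp0 hp24 hpw hmem K mx cur hc0 hcm
    have ha : a ∈ l ∧ p ≤ a ∧ a < 24 := (hmem a).mp (List.mem_cons_self)
    -- split the range at a
    rw [PySem.List.pyRange_one_append p a 24 ha.2.1 (by omega),
        PySem.List.pyRange_one_cons ha.2.2, List.map_append, List.map_cons,
        List.append_assoc, List.cons_append]
    -- hours in [p, a) are inactive
    have hrep : (PySem.List.pyRange p a 1).map (fun h => !(l.contains h))
        = List.replicate (a - p).toNat true := by
      rw [List.eq_replicate_iff]
      constructor
      · simp [PySem.List.length_pyRange_one]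
      · intro b hb
        obtain ⟨h, hh, rfl⟩ := List.mem_map.mp hb
        have hr := PySem.List.mem_pyRange_one.mp hh
        have hnot : h ∉ l := by
          intro hin
          have : h ∈ a :: r := (hmem h).mpr ⟨hin, hr.1, by omega⟩
          rcases List.mem_cons.mp this with rfl | hmr
          · omega
          · have := (List.pairwise_cons.mp hpw).1 h hmr; omega
        simp [hnot]
    rw [hrep, pvScan2_replicate _ _ mx cur hc0 hcm]
    -- hour a itself is active
    have hbit : (!(l.contains a)) = false := by simp [ha.1]
    rw [hbit]
    show pvScan2 (false :: _) _ _ = _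
    simp only [pvScan2, Bool.false_eq_true, if_false]
    have hcast : ((a - p).toNat : Int) = a - p := by omega
    rw [hcast]
    rw [ih (a + 1) (by omega) (by omega) (List.pairwise_cons.mp hpw).2
        (by
          intro h; constructor
          · intro hr
            have h1 := (hmem h).mp (List.mem_cons_of_mem a hr)
            have h2 := (List.pairwise_cons.mp hpw).1 h hr
            exact ⟨h1.1, by omega, h1.2.2⟩
          · intro ⟨hin, hph, hh24⟩
            have : h ∈ a :: r := (hmem h).mpr ⟨hin, by omega, hh24⟩
            rcases List.mem_cons.mp this with rfl | hmr
            · omega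
            · exact hmr)
        K (max mx (cur + (a - p))) 0 (by omega) (by omega)]
    rfl

theorem pvG_fst (as : List Int) : ∀ (p mx : Int), (pvG p as mx 0).1 = max mx (pvGM p as) := by
  induction as with
  | nil => intro p mx; simp [pvG, pvGM]
  | cons a r ih =>
    intro p mx
    show (pvG (a + 1) r (max mx (0 + (a - p))) 0).1 = _
    rw [ih, pvGM]
    simp [max_assoc]

theorem pvG_snd (r : List Int) : ∀ (a p mx cur : Int),
    (pvG p (a :: r) mx cur).2 = 24 - pyLastB a r - 1 := by
  induction r with
  | nil => intro a p mx cur; simp [pvG, pyLastB]; ring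
  | cons b t ih =>
    intro a p mx cur
    show (pvG (a + 1) (b :: t) _ 0).2 = _
    rw [ih b]; rfl

theorem pyLastB_mem (r : List Int) : ∀ (prev : Int), pyLastB prev r ∈ prev :: r := by
  induction r with
  | nil => intro prev; simp [pyLastB]
  | cons b t ih =>
    intro prev
    simp only [pyLastB]
    rcases List.mem_cons.mp (ih b) with h | h
    · simp [h]
    · simp [h]

theorem pyLastB_ge (r : List Int) : ∀ (prev : Int), List.Pairwise (· < ·) (prev :: r) →
    prev ≤ pyLastB prev r := by
  induction r with
  | nil => intro prev _; simp [pyLastB]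
  | cons b t ih =>
    intro prev hpw
    have h1 : prev < b := (List.pairwise_cons.mp hpw).1 b List.mem_cons_self
    have := ih b (List.pairwise_cons.mp hpw).2
    simp only [pyLastB]; omega

theorem pvGM_le (r : List Int) : ∀ (p : Int), 1 ≤ p → (∀ x ∈ r, 0 ≤ x ∧ x < 24) →
    pvGM p r ≤ 23 := by
  induction r with
  | nil => intro p hp _; simp [pvGM]; omega
  | cons a t ih =>
    intro p hp hb
    have ha := hb a List.mem_cons_self
    have := ih (a + 1) (by omega) (fun x hx => hb x (List.mem_cons_of_mem a hx))
    simp only [pvGM]; omega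

theorem pvBFold_eq (r : List Int) : ∀ (prev best : Int), 24 - pyLastB prev r - 1 ≤ best →
    pvBFold prev r best = max best (pvGM (prev + 1) r) := by
  induction r with
  | nil =>
    intro prev best h
    simp only [pyLastB] at h
    simp [pvBFold, pvGM]; omega
  | cons b t ih =>
    intro prev best h
    simp only [pvBFold, pvGM]
    rw [ih b (max best (b - prev - 1)) (by simp only [pyLastB] at h ⊢; omega)]
    have : b - (prev + 1) = b - prev - 1 := by ring
    rw [this, max_assoc]

theorem pvZip_eq_bfold (r : List Int) : ∀ (a best : Int),
    (List.zip (a :: r) r).foldl (fun best p => max best (p.2 - p.1 - 1)) best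
      = pvBFold a r best := by
  induction r with
  | nil => intro a best; rfl
  | cons b t ih =>
    intro a best
    show (List.zip (b :: t) t).foldl _ (max best (b - a - 1)) = _
    rw [ih b]; rfl

-- invariant of pvG needed to chain the two day-copies
theorem pvG_inv (as : List Int) : ∀ (p mx cur : Int), p ≤ 24 → (∀ a ∈ as, a < 24) →
    0 ≤ cur → cur ≤ mx → 0 ≤ (pvG p as mx cur).2 ∧ (pvG p as mx cur).2 ≤ (pvG p as mx cur).1 := by
  induction as with
  | nil => intro p mx cur hp _ h0 h1; simp [pvG]; omega
  | cons a r ih =>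
    intro p mx cur hp hb h0 h1
    have ha := hb a List.mem_cons_self
    exact ih (a + 1) (max mx (cur + (a - p))) 0 (by omega)
      (fun x hx => hb x (List.mem_cons_of_mem a hx)) (by omega) (by omega)

-- ===== VERDICT (by name: the statement is the Claim_ definition above) =====
theorem find_longest_inactive_period_py_spec : Claim_equal_find_longest_inactive_period_py := by
  intro l _
  unfold Spec_find_longest_inactive_period_py
  unfold find_longest_inactive_period_py find_longest_inactive_period_py_alt
  set as := PySem.List.sorted
    (PySem.Set.ofList (l.filter (fun h => decide (0 ≤ h) && decide (h < 24))))
    (fun x => x) false with has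
  have hpw : List.Pairwise (· < ·) as := PySem.List.sorted_ofList_pairwise_lt _
  have hmem : ∀ h : Int, h ∈ as ↔ (h ∈ l ∧ 0 ≤ h ∧ h < 24) := by
    intro h
    rw [has, PySem.List.mem_sorted, PySem.Set.mem_ofList, List.mem_filter]
    simp
  -- A's doubled scan, expressed through pvG
  have hbits : (PySem.List.pyRange 0 24 1).map
      (fun hour => (PySem.Dict.counter l).getD (PySem.Int.mod hour 24) 0 == 0)
      = (PySem.List.pyRange 0 24 1).map (fun h => !(l.contains h)) := by
    apply List.map_congr_left
    intro h hh
    have := PySem.List.mem_pyRange_one.mp hh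
    exact pvBit_eq l h this.1 this.2
  have hG1 := pvG_inv as 0 0 0 (by omega)
      (fun a hax => ((hmem a).mp hax).2.2) (by omega) (by omega)
  have hscan : ((PySem.List.pyRange 0 24 1 ++ PySem.List.pyRange 0 24 1).foldl
      (fun (s : Int × Int) hour =>
        if (PySem.Dict.counter l).getD (PySem.Int.mod hour 24) 0 == 0 then (max s.1 (s.2 + 1), s.2 + 1)
        else (s.1, 0)) (0, 0)).1
      = (pvG 0 as (pvG 0 as 0 0).1 (pvG 0 as 0 0).2).1 := by
    rw [pvFold_eq_scan2, List.map_append, hbits]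
    rw [pvScan_seg l as 0 (by omega) (by omega) hpw hmem _ 0 0 (by omega) (by omega)]
    rw [← List.append_nil ((PySem.List.pyRange 0 24 1).map (fun h => !(l.contains h)))]
    rw [pvScan_seg l as 0 (by omega) (by omega) hpw hmem [] _ _ hG1.1 hG1.2]
    rfl
  by_cases hnil : l = []
  · -- A returns early; B's active list is empty
    have : as = [] := by
      rw [has, hnil]
      rfl
    rw [if_pos hnil, this]
  · rw [if_neg hnil]
    show min _ 24 = _
    rw [hscan]
    cases h : as with
    | nil =>
      -- no valid active hour: both scans run through, A caps 48 at 24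
      norm_num [pvG]
    | cons a r =>
      rw [h] at hpw hmem
      have ha : 0 ≤ a ∧ a < 24 := by
        have := (hmem a).mp List.mem_cons_self; exact ⟨this.2.1, this.2.2⟩
      have hlast_mem := pyLastB_mem r a
      have hlast24 : pyLastB a r < 24 := by
        rcases List.mem_cons.mp hlast_mem with hq | hq
        · omega
        · exact ((hmem _).mp (List.mem_cons_of_mem a hq)).2.2
      have hlast_ge := pyLastB_ge r a hpw
      have hrb : ∀ x ∈ r, 0 ≤ x ∧ x < 24 := by
        intro x hx
        have := (hmem x).mp (List.mem_cons_of_mem a hx)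
        exact ⟨this.2.1, this.2.2⟩
      have hGMle := pvGM_le r (a + 1) (by omega) hrb
      -- unfold the two passes of pvG over a :: r
      show min (pvG 0 (a :: r) (pvG 0 (a :: r) 0 0).1 (pvG 0 (a :: r) 0 0).2).1 24 = _
      have e1 : (pvG 0 (a :: r) 0 0).1 = max (max 0 (a - 0)) (pvGM (a + 1) r) := by
        show (pvG (a + 1) r (max 0 (0 + (a - 0))) 0).1 = _
        rw [pvG_fst]; norm_num
      have e2 : (pvG 0 (a :: r) 0 0).2 = 24 - pyLastB a r - 1 := pvG_snd r a 0 0 0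
      have e3 : (pvG 0 (a :: r) (pvG 0 (a :: r) 0 0).1 (pvG 0 (a :: r) 0 0).2).1
          = max (max (pvG 0 (a :: r) 0 0).1 ((pvG 0 (a :: r) 0 0).2 + (a - 0))) (pvGM (a + 1) r) := by
        show (pvG (a + 1) r _ 0).1 = _
        rw [pvG_fst]
      rw [e3, e1, e2]
      -- B's side
      show _ = List.foldl (fun best p => max best (p.2 - p.1 - 1)) (a + 24 - pyLastB a r - 1)
        ((a :: r).zip (List.drop 1 (a :: r)))
      have hz : (a :: r).zip (List.drop 1 (a :: r)) = List.zip (a :: r) r := rfl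
      rw [hz, pvZip_eq_bfold r a, pvBFold_eq r a _ (by omega)]
      omega
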